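-- pv_equiv track=rewrite | github.com/phuang/test | gl/indexiz.py | indexiz
-- ===== SOURCE A (Python) =====
-- stride = 10
--
-- def indexiz(vertices, indexRange):
--     index = 0
--     indexMap = {}
--     indices = []
--     vertices = [ tuple(vertices[i:i + stride]) for i in range(0, len(vertices), stride) ]
--
--     count = 0
--
--     outputVertices = []
--
--     for i, key in enumerate(vertices):
--         if count == indexRange:
--             count = 0
--             indexMap.clear()
--         count += 1
--         if key in indexMap:
--             indices.append(indexMap[key])
--         else:
--             indexMap[key] = index
--             indices.append(index)
--             outputVertices.append(list(key))
--             index += 1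
--     return outputVertices, indices
-- ===== SOURCE B (Python) =====
-- stride = 10
--
-- def indexiz(vertices, indexRange):
--     chunks = [tuple(vertices[i:i + stride]) for i in range(0, len(vertices), stride)]
--     # Split the chunk sequence into blocks; each block gets a brand-new map.
--     if indexRange > 0:
--         blocks = []
--         rest = chunks
--         while rest:
--             blocks.append(rest[:indexRange])
--             rest = rest[indexRange:]
--     else:
--         blocks = [chunks]
--     index = 0
--     indices = []
--     outputVertices = []
--     for block in blocks:
--         indexMap = {}
--         for key in block:
--             if key in indexMap:
--                 indices.append(indexMap[key])
--             else:
--                 indexMap[key] = index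
--                 indices.append(index)
--                 outputVertices.append(list(key))
--                 index += 1
--     return outputVertices, indices
-- ===== Notes on version B (the rewrite author's own statement) =====
-- stated objective: alternative
-- what changed: Replaces the flat loop with a modular counter and periodic indexMap.clear() by an explicit split of the chunk sequence into blocks of size indexRange (one whole block when indexRange <= 0), with a nested loop giving each block a fresh dict while the index counter and output lists run across blocks.
import Mathlib
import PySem

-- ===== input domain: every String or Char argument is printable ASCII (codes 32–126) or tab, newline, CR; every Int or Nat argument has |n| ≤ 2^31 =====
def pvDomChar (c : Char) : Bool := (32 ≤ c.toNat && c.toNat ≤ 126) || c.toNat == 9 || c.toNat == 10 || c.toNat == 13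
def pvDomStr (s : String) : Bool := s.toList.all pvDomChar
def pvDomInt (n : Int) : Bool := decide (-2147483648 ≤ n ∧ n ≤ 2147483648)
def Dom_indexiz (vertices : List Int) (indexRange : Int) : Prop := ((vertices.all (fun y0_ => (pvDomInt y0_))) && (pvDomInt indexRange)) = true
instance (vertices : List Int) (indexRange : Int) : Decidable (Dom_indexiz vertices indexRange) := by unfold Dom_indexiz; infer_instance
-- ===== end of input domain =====

-- B replaces A's flat loop with a modular counter and periodic map clearing by an
-- explicit split of the chunk list into blocks, each processed with a fresh dict
-- (objective: alternative decomposition, same cost).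

-- ===== PORT A =====
-- shared preprocessing: both Pythons build the stride-10 tuple list the same way
def chunksOf (vertices : List Int) : List (List Int) :=
  (PySem.List.pyRange 0 vertices.length 10).map
    (fun i => PySem.List.slice vertices (some i) (some (i + 10)))

-- one iteration of A's for-loop (state: index, indexMap, indices, count, outputVertices)
def stepA (indexRange : Int)
    (st : Int × PySem.Dict (List Int) Int × List Int × Int × List (List Int))
    (key : List Int) : Int × PySem.Dict (List Int) Int × List Int × Int × List (List Int) :=
  match st with
  | (index, indexMap, indices, count, outputVertices) =>
    let p := if count == indexRange then ((0 : Int), (PySem.Dict.empty : PySem.Dict (List Int) Int))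
             else (count, indexMap)
    let count := p.1 + 1
    let indexMap := p.2
    match indexMap.get? key with
    | some v => (index, indexMap, indices ++ [v], count, outputVertices)
    | none => (index + 1, indexMap.insert key index, indices ++ [index], count,
               outputVertices ++ [key])

def indexiz (vertices : List Int) (indexRange : Int) : List (List Int) × List Int :=
  let chunks := chunksOf vertices
  let fin := chunks.foldl (stepA indexRange) (0, PySem.Dict.empty, [], 0, [])
  (fin.2.2.2.2, fin.2.2.1)

-- ===== PORT B =====
-- B's while loop: peel blocks of size k+1 off the front (called with k = indexRange - 1)
def blocksOf1 (k : Nat) : List (List Int) → List (List (List Int))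
  | [] => []
  | x :: xs => ((x :: xs).take (k + 1)) :: blocksOf1 k ((x :: xs).drop (k + 1))
termination_by xs => xs.length
decreasing_by simp

-- one iteration of B's inner loop (state: index, indexMap, indices, outputVertices)
def stepB (st : Int × PySem.Dict (List Int) Int × List Int × List (List Int))
    (key : List Int) : Int × PySem.Dict (List Int) Int × List Int × List (List Int) :=
  match st with
  | (index, indexMap, indices, outputVertices) =>
    match indexMap.get? key with
    | some v => (index, indexMap, indices ++ [v], outputVertices)
    | none => (index + 1, indexMap.insert key index, indices ++ [index], outputVertices ++ [key])

-- one iteration of B's outer loop: a block with a brand-new dict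
def blockStep (st : Int × List Int × List (List Int)) (block : List (List Int)) :
    Int × List Int × List (List Int) :=
  let t := block.foldl stepB (st.1, PySem.Dict.empty, st.2.1, st.2.2)
  (t.1, t.2.2.1, t.2.2.2)

def indexiz_alt (vertices : List Int) (indexRange : Int) : List (List Int) × List Int :=
  let chunks := chunksOf vertices
  let blocks := if indexRange > 0 then blocksOf1 (indexRange.toNat - 1) chunks else [chunks]
  let fin := blocks.foldl blockStep (0, [], [])
  (fin.2.2, fin.2.1)

-- ===== PRECONDITION & SPEC =====
def Spec_indexiz (vertices : List Int) (indexRange : Int) (out : List (List Int) × List Int) : Prop := out = indexiz_alt vertices indexRange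
instance (vertices : List Int) (indexRange : Int) (out : List (List Int) × List Int) : Decidable (Spec_indexiz vertices indexRange out) := by unfold Spec_indexiz; infer_instance

-- ===== CLAIM (what is proved, stated in full; the proofs are below) =====
def Claim_equal_indexiz : Prop := ∀ (vertices : List Int) (indexRange : Int), Dom_indexiz vertices indexRange → Spec_indexiz vertices indexRange (indexiz vertices indexRange)

-- ===== LEMMAS AND PROOFS =====

-- projection of A's loop state onto B's outer-loop state
def projA (s : Int × PySem.Dict (List Int) Int × List Int × Int × List (List Int)) :
    Int × List Int × List (List Int) := (s.1, s.2.2.1, s.2.2.2.2)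

-- within a block no reset fires and the count just advances by the length
theorem foldA_noReset (r : Int) :
    ∀ (xs : List (List Int)) (c : Int), c + xs.length ≤ r →
    ∀ (idx : Int) (m : PySem.Dict (List Int) Int) (ind : List Int) (out : List (List Int)),
    xs.foldl (stepA r) (idx, m, ind, c, out) =
      (let t := xs.foldl stepB (idx, m, ind, out);
       (t.1, t.2.1, t.2.2.1, c + xs.length, t.2.2.2)) := by
  intro xs
  induction xs with
  | nil => intro c h idx m ind out; simp
  | cons x t ih =>
    intro c h idx m ind out
    have hlen : (t.length : Int) ≥ 0 := by positivity
    have hne : c ≠ r := by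
      simp only [List.length_cons] at h; push_cast at h; omega
    simp only [List.foldl_cons]
    have hb : (c == r) = false := by simpa using hne
    have hstep : stepA r (idx, m, ind, c, out) x =
        (match m.get? x with
         | some v => (idx, m, ind ++ [v], c + 1, out)
         | none => (idx + 1, m.insert x idx, ind ++ [idx], c + 1, out ++ [x])) := by
      simp [stepA, hb]
    have h' : (c + 1) + (t.length : Int) ≤ r := by
      simp only [List.length_cons] at h; push_cast at h ⊢; omega
    cases hm : m.get? x with
    | some v =>
      rw [hstep]; simp only [hm]
      rw [ih (c + 1) h']
      simp only [stepB, hm, List.length_cons]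
      push_cast; ring_nf
    | none =>
      rw [hstep]; simp only [hm]
      rw [ih (c + 1) h']
      simp only [stepB, hm, List.length_cons]
      push_cast; ring_nf

-- at count = r (> 0) the first step clears the map and restarts the count
theorem foldA_reset (r : Int) (hr : 0 < r) (y : List Int) (ys : List (List Int))
    (idx : Int) (m : PySem.Dict (List Int) Int) (ind : List Int) (out : List (List Int)) :
    (y :: ys).foldl (stepA r) (idx, m, ind, r, out) =
    (y :: ys).foldl (stepA r) (idx, PySem.Dict.empty, ind, 0, out) := by
  simp only [List.foldl_cons]
  congr 1
  have hb0 : ((0 : Int) == r) = false := by simp; omega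
  simp [stepA, hb0]

theorem posMain (r : Int) (hr : 0 < r) :
    ∀ (xs : List (List Int)) (idx : Int) (ind : List Int) (out : List (List Int)),
    projA (xs.foldl (stepA r) (idx, PySem.Dict.empty, ind, 0, out)) =
      (blocksOf1 (r.toNat - 1) xs).foldl blockStep (idx, ind, out) := by
  have main : ∀ (n : Nat) (xs : List (List Int)), xs.length = n →
      ∀ (idx : Int) (ind : List Int) (out : List (List Int)),
      projA (xs.foldl (stepA r) (idx, PySem.Dict.empty, ind, 0, out)) =
        (blocksOf1 (r.toNat - 1) xs).foldl blockStep (idx, ind, out) := by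
    intro n
    induction n using Nat.strongRecOn with
    | ind n ih' =>
    intro xs hn idx ind out
    have ih : ∀ (ys : List (List Int)), ys.length < xs.length →
        ∀ (idx : Int) (ind : List Int) (out : List (List Int)),
        projA (ys.foldl (stepA r) (idx, PySem.Dict.empty, ind, 0, out)) =
          (blocksOf1 (r.toNat - 1) ys).foldl blockStep (idx, ind, out) := by
      intro ys hlt
      exact ih' ys.length (by omega) ys rfl
    match xs with
    | [] => simp [blocksOf1, projA]
    | x :: t =>
      have hk1 : r.toNat - 1 + 1 = r.toNat := by omega
      have hkpos : 1 ≤ r.toNat := by omega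
      rw [show blocksOf1 (r.toNat - 1) (x :: t) =
          ((x :: t).take r.toNat) :: blocksOf1 (r.toNat - 1) ((x :: t).drop r.toNat) by
        rw [blocksOf1]; rw [hk1]]
      have hsplit : (x :: t) = (x :: t).take r.toNat ++ (x :: t).drop r.toNat :=
        (List.take_append_drop _ _).symm
      have htlen : ((x :: t).take r.toNat).length ≤ r.toNat := by
        simp [List.length_take]
      have hc : (0 : Int) + ((x :: t).take r.toNat).length ≤ r := by
        have : (((x :: t).take r.toNat).length : Int) ≤ (r.toNat : Int) := by exact_mod_cast htlen
        omega
      conv_lhs => rw [hsplit]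
      rw [List.foldl_append, foldA_noReset r _ 0 hc]
      set tt := ((x :: t).take r.toNat).foldl stepB (idx, PySem.Dict.empty, ind, out) with htt
      simp only []
      cases hd : (x :: t).drop r.toNat with
      | nil =>
        simp only [List.foldl_nil, projA, blocksOf1, List.foldl_cons, blockStep, ← htt]
      | cons y ys =>
        have hfull : ((x :: t).take r.toNat).length = r.toNat := by
          have : r.toNat ≤ (x :: t).length := by
            by_contra hcon
            have : (x :: t).drop r.toNat = [] := List.drop_eq_nil_of_le (by omega)
            rw [hd] at this; exact List.cons_ne_nil _ _ this
          rw [List.length_take]; omega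
        have hcount : (0 : Int) + (((x :: t).take r.toNat).length : Int) = r := by
          rw [hfull]; omega
        rw [hcount, foldA_reset r hr]
        have hdec : (y :: ys).length < (x :: t).length := by
          have := List.length_drop (l := x :: t) (i := r.toNat)
          rw [hd] at this
          simp only [List.length_cons] at this ⊢
          omega
        rw [ih (y :: ys) hdec tt.1 tt.2.2.1 tt.2.2.2]
        simp only [List.foldl_cons, blockStep, ← htt]
  intro xs idx ind out
  exact main xs.length xs rfl idx ind out

-- with indexRange ≤ 0 the reset can only fire on the first step with an empty map: no effect
theorem negMain (r : Int) (hr : r ≤ 0) :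
    ∀ (xs : List (List Int)) (c : Int), 0 ≤ c →
    ∀ (idx : Int) (m : PySem.Dict (List Int) Int) (ind : List Int) (out : List (List Int)),
    (c = r → m = PySem.Dict.empty) →
    projA (xs.foldl (stepA r) (idx, m, ind, c, out)) =
      (let t := xs.foldl stepB (idx, m, ind, out); (t.1, t.2.2.1, t.2.2.2)) := by
  intro xs
  induction xs with
  | nil => intro c _ idx m ind out _; simp [projA]
  | cons x t ih =>
    intro c hc idx m ind out hm
    simp only [List.foldl_cons]
    by_cases hcr : c = r
    · have hme : m = PySem.Dict.empty := hm hcr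
      subst hme
      have hb : (c == r) = true := by simpa using hcr
      have hstep : stepA r (idx, PySem.Dict.empty, ind, c, out) x =
          (match (PySem.Dict.empty : PySem.Dict (List Int) Int).get? x with
           | some v => (idx, PySem.Dict.empty, ind ++ [v], (0 : Int) + 1, out)
           | none => (idx + 1, PySem.Dict.empty.insert x idx, ind ++ [idx], (0 : Int) + 1,
                      out ++ [x])) := by
        simp [stepA, hb]
      cases hg : (PySem.Dict.empty : PySem.Dict (List Int) Int).get? x with
      | some v =>
        rw [hstep]; simp only [hg]
        rw [ih (0 + 1) (by omega) _ _ _ _ (by intro h1; omega)]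
        simp [stepB, hg]
      | none =>
        rw [hstep]; simp only [hg]
        rw [ih (0 + 1) (by omega) _ _ _ _ (by intro h1; omega)]
        simp [stepB, hg]
    · have hstep : stepA r (idx, m, ind, c, out) x =
          (match m.get? x with
           | some v => (idx, m, ind ++ [v], c + 1, out)
           | none => (idx + 1, m.insert x idx, ind ++ [idx], c + 1, out ++ [x])) := by
        have hb : (c == r) = false := by simpa using hcr
        simp [stepA, hb]
      cases hg : m.get? x with
      | some v =>
        rw [hstep]; simp only [hg]
        rw [ih (c + 1) (by omega) _ _ _ _ (by intro h1; omega)]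
        simp [stepB, hg]
      | none =>
        rw [hstep]; simp only [hg]
        rw [ih (c + 1) (by omega) _ _ _ _ (by intro h1; omega)]
        simp [stepB, hg]

-- ===== VERDICT (by name: the statement is the Claim_ definition above) =====
theorem indexiz_spec : Claim_equal_indexiz := by
  intro vertices indexRange _
  unfold Spec_indexiz indexiz indexiz_alt
  by_cases hr : indexRange > 0
  · have h := posMain indexRange hr (chunksOf vertices) 0 [] []
    simp only [if_pos hr]
    have h1 := congrArg (fun p : Int × List Int × List (List Int) => p.2.1) h
    have h2 := congrArg (fun p : Int × List Int × List (List Int) => p.2.2) h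
    simp only [projA] at h1 h2
    rw [h1, h2]
  · have h := negMain indexRange (by omega) (chunksOf vertices) 0 (by omega) 0
      PySem.Dict.empty [] [] (by intro _; rfl)
    simp only [if_neg hr]
    have h1 := congrArg (fun p : Int × List Int × List (List Int) => p.2.1) h
    have h2 := congrArg (fun p : Int × List Int × List (List Int) => p.2.2) h
    simp only [projA] at h1 h2
    simp only [List.foldl_cons, List.foldl_nil, blockStep]
    rw [h1, h2]
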